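-- pv_equiv track=rewrite | github.com/alnwlkr/42bangkok_discovery_piscine_python | rush/ex00/checkmate.py | b_valid
-- ===== SOURCE A (Python) =====
-- def b_valid(b_l):
--     if not b_l:
--         return False
--     r = len(b_l)
--     for i in range(r):
--         if len(b_l[i]) != r:
--             return False
--     for i in range(r):
--         for j in range(r):
--             if not b_l[i][j] in ['P','B','R','Q','K','.']:
--                 return False
--     return True
-- ===== SOURCE B (Python) =====
-- ALLOWED = ('P', 'B', 'R', 'Q', 'K', '.')
--
--
-- def b_valid(b_l):
--     r = len(b_l)
--     if r == 0:
--         return False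
--     if any(len(row) != r for row in b_l):
--         return False
--     return sum(row.count(c) for c in ALLOWED for row in b_l) == r * r
-- ===== Notes on version B (the rewrite author's own statement) =====
-- stated objective: alternative
-- what changed: B decides the cell condition by counting: instead of scanning for an invalid cell, it tallies per-symbol occurrence counts of the six allowed pieces across all rows and declares the board valid exactly when that total equals r*r; the shape check becomes a single any() over rows.
import Mathlib
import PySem

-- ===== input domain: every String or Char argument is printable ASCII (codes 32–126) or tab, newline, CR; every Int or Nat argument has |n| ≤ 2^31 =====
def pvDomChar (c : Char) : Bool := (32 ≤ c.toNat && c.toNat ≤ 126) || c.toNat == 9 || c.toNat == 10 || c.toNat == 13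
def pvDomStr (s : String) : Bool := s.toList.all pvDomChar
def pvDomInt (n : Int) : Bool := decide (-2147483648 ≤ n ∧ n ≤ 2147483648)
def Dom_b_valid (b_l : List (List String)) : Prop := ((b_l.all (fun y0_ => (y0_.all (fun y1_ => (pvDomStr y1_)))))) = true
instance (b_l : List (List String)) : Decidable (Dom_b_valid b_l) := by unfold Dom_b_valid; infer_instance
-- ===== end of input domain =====

-- B replaces A's search for an invalid cell by a counting argument: it tallies the
-- occurrences of the six allowed symbols over the whole board and accepts iff the
-- total equals r*r (alternative decomposition, same asymptotic cost).

-- ===== PORT A =====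
-- b_l[i] / b_l[i][j] with i,j drawn from range(len(b_l)): ported with pyGetD (the
-- indices are always in range where the access is reached, so the default is inert).
def b_valid_loop1 (b_l : List (List String)) (r : Int) : List Int → Bool
  | [] => true
  | i :: is =>
      if ((PySem.List.pyGetD b_l i []).length : Int) ≠ r then false
      else b_valid_loop1 b_l r is

def b_valid_inner (b_l : List (List String)) (i : Int) : List Int → Bool
  | [] => true
  | j :: js =>
      if ¬ (["P","B","R","Q","K","."].contains (PySem.List.pyGetD (PySem.List.pyGetD b_l i []) j "")) then false
      else b_valid_inner b_l i js

def b_valid_outer (b_l : List (List String)) (r : Int) : List Int → Bool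
  | [] => true
  | i :: is =>
      if b_valid_inner b_l i (PySem.List.pyRange 0 r 1) = false then false
      else b_valid_outer b_l r is

def b_valid (b_l : List (List String)) : Bool :=
  if b_l = [] then false
  else
    let r : Int := b_l.length
    if b_valid_loop1 b_l r (PySem.List.pyRange 0 r 1) = false then false
    else if b_valid_outer b_l r (PySem.List.pyRange 0 r 1) = false then false
    else true

-- ===== PORT B =====
def allowedCells : List String := ["P", "B", "R", "Q", "K", "."]

def b_valid_alt (b_l : List (List String)) : Bool :=
  let r := b_l.length
  if r = 0 then false
  else if b_l.any (fun row => row.length != r) then false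
  else (allowedCells.foldl (fun acc c => b_l.foldl (fun a row => a + row.count c) acc) 0) == r * r

-- ===== PRECONDITION & SPEC =====
def Spec_b_valid (b_l : List (List String)) (out : Bool) : Prop := out = b_valid_alt b_l
instance (b_l : List (List String)) (out : Bool) : Decidable (Spec_b_valid b_l out) := by unfold Spec_b_valid; infer_instance

-- ===== CLAIM (what is proved, stated in full; the proofs are below) =====
def Claim_equal_b_valid : Prop := ∀ (b_l : List (List String)), Dom_b_valid b_l → Spec_b_valid b_l (b_valid b_l)

-- ===== LEMMAS AND PROOFS =====

theorem loop1_eq_all (b_l : List (List String)) (r : Int) (is : List Int) :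
    b_valid_loop1 b_l r is = is.all (fun i => ((PySem.List.pyGetD b_l i []).length : Int) == r) := by
  induction is with
  | nil => rfl
  | cons i is ih =>
      simp only [b_valid_loop1, List.all_cons, ih]
      split_ifs with h
      · simp [h]
      · simp [not_not.mp h]

theorem inner_eq_all (b_l : List (List String)) (i : Int) (js : List Int) :
    b_valid_inner b_l i js = js.all (fun j => ["P","B","R","Q","K","."].contains (PySem.List.pyGetD (PySem.List.pyGetD b_l i []) j "")) := by
  induction js with
  | nil => rfl
  | cons j js ih =>
      simp only [b_valid_inner, List.all_cons, ih]
      split_ifs with h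
      · simp at h; simp [h]
      · simp at h; simp [h]

theorem outer_eq_all (b_l : List (List String)) (r : Int) (is : List Int) :
    b_valid_outer b_l r is = is.all (fun i => b_valid_inner b_l i (PySem.List.pyRange 0 r 1)) := by
  induction is with
  | nil => rfl
  | cons i is ih =>
      simp only [b_valid_outer, List.all_cons, ih]
      split_ifs with h
      · simp [h]
      · simp [Bool.not_eq_false] at h; simp [h]

-- index form ↔ membership form for the length pass
theorem lengths_iff (b_l : List (List String)) :
    (∀ i ∈ PySem.List.pyRange 0 (b_l.length : Int) 1,
        ((PySem.List.pyGetD b_l i []).length : Int) = (b_l.length : Int))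
      ↔ (∀ row ∈ b_l, (row.length : Int) = (b_l.length : Int)) := by
  constructor
  · intro h row hrow
    obtain ⟨k, hk, rfl⟩ := List.mem_iff_getElem.mp hrow
    have := h (k : Int) (by rw [PySem.List.mem_pyRange_one]; constructor <;> [positivity; exact_mod_cast hk])
    rwa [PySem.List.pyGetD_natCast, List.getD_eq_getElem _ _ hk] at this
  · intro h i hi
    rw [PySem.List.mem_pyRange_one] at hi
    obtain ⟨h0, h1⟩ := hi
    obtain ⟨k, rfl⟩ := Int.eq_ofNat_of_zero_le h0
    have hk : k < b_l.length := by exact_mod_cast h1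
    rw [PySem.List.pyGetD_natCast, List.getD_eq_getElem _ _ hk]
    exact h _ (b_l.getElem_mem hk)

-- A's value, characterised: nonempty, square, all cells among the six symbols.
theorem A_true_iff (b_l : List (List String)) (hne : b_l ≠ []) :
    b_valid b_l = true ↔
      ((∀ row ∈ b_l, row.length = b_l.length) ∧
        ∀ row ∈ b_l, ∀ x ∈ row, x ∈ (["P","B","R","Q","K","."] : List String)) := by
  simp only [b_valid, if_neg hne]
  by_cases hlen : ∀ row ∈ b_l, row.length = b_l.length
  · have hlenZ : ∀ row ∈ b_l, (row.length : Int) = (b_l.length : Int) := by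
      intro row hr; exact_mod_cast hlen row hr
    have hloop1 : b_valid_loop1 b_l (b_l.length : Int) (PySem.List.pyRange 0 (b_l.length : Int) 1) = true := by
      rw [loop1_eq_all, List.all_eq_true]
      intro i hi
      simpa using (lengths_iff b_l).mpr hlenZ i hi
    rw [hloop1]
    simp only [Bool.true_eq_false, if_false]
    constructor
    · intro hcell
      by_cases houter : b_valid_outer b_l (b_l.length : Int) (PySem.List.pyRange 0 (b_l.length : Int) 1) = false
      · simp [houter] at hcell
      · refine ⟨hlen, ?_⟩
        intro row hrow x hx
        obtain ⟨k, hk, rfl⟩ := List.mem_iff_getElem.mp hrow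
        obtain ⟨j, hj, rfl⟩ := List.mem_iff_getElem.mp hx
        rw [Bool.not_eq_false] at houter
        rw [outer_eq_all, List.all_eq_true] at houter
        have hinner := houter (k : Int)
          (by rw [PySem.List.mem_pyRange_one]; constructor <;> [positivity; exact_mod_cast hk])
        rw [inner_eq_all, List.all_eq_true] at hinner
        have hrowlen : b_l[k].length = b_l.length := hlen b_l[k] (b_l.getElem_mem hk)
        have hj' : j < b_l.length := hrowlen ▸ hj
        have hmem := hinner (j : Int)
          (by rw [PySem.List.mem_pyRange_one]; constructor <;> [positivity; exact_mod_cast hj'])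
        have e1 : PySem.List.pyGetD b_l (k : Int) [] = b_l[k] := by
          rw [PySem.List.pyGetD_natCast, List.getD_eq_getElem _ _ hk]
        have e2 : PySem.List.pyGetD b_l[k] (j : Int) "" = b_l[k][j] := by
          rw [PySem.List.pyGetD_natCast, List.getD_eq_getElem _ _ hj]
        rw [e1, e2] at hmem
        simpa using hmem
    · intro ⟨_, hmem⟩
      have houter : b_valid_outer b_l (b_l.length : Int) (PySem.List.pyRange 0 (b_l.length : Int) 1) = true := by
        rw [outer_eq_all, List.all_eq_true]
        intro i hi
        rw [PySem.List.mem_pyRange_one] at hi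
        obtain ⟨h0, h1⟩ := hi
        obtain ⟨k, rfl⟩ := Int.eq_ofNat_of_zero_le h0
        have hk : k < b_l.length := by exact_mod_cast h1
        rw [inner_eq_all, List.all_eq_true]
        intro j hj
        rw [PySem.List.mem_pyRange_one] at hj
        obtain ⟨j0, j1⟩ := hj
        obtain ⟨m, rfl⟩ := Int.eq_ofNat_of_zero_le j0
        have hrowlen : b_l[k].length = b_l.length := hlen b_l[k] (b_l.getElem_mem hk)
        have hm : m < b_l[k].length := by rw [hrowlen]; exact_mod_cast j1
        have e1 : PySem.List.pyGetD b_l (k : Int) [] = b_l[k] := by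
          rw [PySem.List.pyGetD_natCast, List.getD_eq_getElem _ _ hk]
        have e2 : PySem.List.pyGetD b_l[k] (m : Int) "" = b_l[k][m] := by
          rw [PySem.List.pyGetD_natCast, List.getD_eq_getElem _ _ hm]
        rw [e1, e2]
        have := hmem b_l[k] (b_l.getElem_mem hk) b_l[k][m] ((b_l[k]).getElem_mem hm)
        simpa using this
      rw [houter]
      simp
  · have hloop1 : b_valid_loop1 b_l (b_l.length : Int) (PySem.List.pyRange 0 (b_l.length : Int) 1) = false := by
      rw [loop1_eq_all]
      have : ¬ ∀ row ∈ b_l, (row.length : Int) = (b_l.length : Int) := by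
        intro h; exact hlen (fun row hr => by exact_mod_cast h row hr)
      rw [← lengths_iff] at this
      push_neg at this
      obtain ⟨i, hi, hibad⟩ := this
      rw [List.all_eq_false]
      exact ⟨i, hi, by simpa using hibad⟩
    rw [hloop1]
    
    constructor
    · intro h; cases h
    · intro ⟨hl, _⟩; exact absurd hl hlen

-- a foldl with additive step is the starting value plus a mapped sum
theorem foldl_add_map {α : Type} (f : α → ℕ) (l : List α) (n : ℕ) :
    l.foldl (fun a x => a + f x) n = n + (l.map f).sum := by
  induction l generalizing n with
  | nil => simp
  | cons x t ih => simp [ih, Nat.add_assoc]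

-- the per-row total of the counts of the symbols in cs is the number of cells lying in cs
theorem sum_indicator (x : String) (cs : List String) (h : cs.Nodup) :
    (cs.map (fun c => if x == c then 1 else 0)).sum = if x ∈ cs then 1 else 0 := by
  induction cs with
  | nil => simp
  | cons c rest ihc =>
      have hrest := ihc (List.Nodup.of_cons h)
      simp only [List.map_cons, List.sum_cons, hrest]
      by_cases hxc : x = c
      · subst hxc
        have hxrest : x ∉ rest := (List.nodup_cons.mp h).1
        simp [hxrest]
      · simp [hxc, List.mem_cons]

theorem sum_count_eq_filter (cs : List String) (h : cs.Nodup) (row : List String) :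
    (cs.map (fun c => row.count c)).sum = (row.filter (fun x => x ∈ cs)).length := by
  induction row with
  | nil => simp
  | cons x t ih =>
      have hcnt : ∀ c, (x :: t).count c = t.count c + if x == c then 1 else 0 := by
        intro c; exact List.count_cons
      have hsplit : (cs.map (fun c => (x :: t).count c)).sum
          = (cs.map (fun c => t.count c)).sum + (cs.map (fun c => if x == c then 1 else 0)).sum := by
        calc (cs.map (fun c => (x :: t).count c)).sum
            = (cs.map (fun c => t.count c + if x == c then 1 else 0)).sum := by
              simp only [hcnt]
          _ = _ := List.sum_map_add
      rw [hsplit, sum_indicator x cs h, ih]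
      by_cases hxm : x ∈ cs <;> simp [hxm]

-- sum of list of nats each ≤ r equals length * r iff all equal r
theorem sum_eq_mul_iff (l : List ℕ) (r : ℕ) (hb : ∀ x ∈ l, x ≤ r) :
    l.sum = l.length * r ↔ ∀ x ∈ l, x = r := by
  induction l with
  | nil => simp
  | cons x t ih =>
      have hbt : ∀ y ∈ t, y ≤ r := fun y hy => hb y (List.mem_cons_of_mem _ hy)
      have hsum_le : t.sum ≤ t.length * r := by
        clear ih hb
        induction t with
        | nil => simp
        | cons y s ihs =>
            have := hbt y (by simp)
            have hs := ihs (fun z hz => hbt z (List.mem_cons_of_mem _ hz))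
            simp only [List.sum_cons, List.length_cons]
            calc y + s.sum ≤ r + s.length * r := Nat.add_le_add this hs
              _ = (s.length + 1) * r := by ring
      have hx := hb x (by simp)
      constructor
      · intro hsum
        have hxr : x = r ∧ t.sum = t.length * r := by
          simp only [List.sum_cons, List.length_cons] at hsum
          have : (t.length + 1) * r = t.length * r + r := by ring
          omega
        intro y hy
        rcases List.mem_cons.mp hy with rfl | hyt
        · exact hxr.1
        · exact ((ih hbt).mp hxr.2) y hyt
      · intro hall
        have hxr : x = r := hall x (by simp)
        have htr : t.sum = t.length * r := (ih hbt).mpr (fun y hy => hall y (List.mem_cons_of_mem _ hy))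
        simp only [List.sum_cons, List.length_cons, hxr, htr]
        ring

-- B's value, characterised the same way
theorem alt_true_iff (b_l : List (List String)) (hne : b_l ≠ []) :
    b_valid_alt b_l = true ↔
      ((∀ row ∈ b_l, row.length = b_l.length) ∧
        ∀ row ∈ b_l, ∀ x ∈ row, x ∈ (["P","B","R","Q","K","."] : List String)) := by
  have hr0 : b_l.length ≠ 0 := by simpa [List.length_eq_zero_iff] using hne
  simp only [b_valid_alt, if_neg hr0]
  by_cases hany : b_l.any (fun row => row.length != b_l.length)
  · rw [if_pos hany]
    simp only [List.any_eq_true, bne_iff_ne, ne_eq] at hany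
    obtain ⟨row, hrow, hbad⟩ := hany
    constructor
    · intro h; cases h
    · intro ⟨hl, _⟩; exact absurd (hl row hrow) hbad
  · rw [if_neg hany]
    simp only [List.any_eq_true, bne_iff_ne, ne_eq, not_exists, not_and, not_not] at hany
    -- total = Σ over rows of the number of allowed cells
    have htot : allowedCells.foldl (fun acc c => b_l.foldl (fun a row => a + row.count c) acc) 0
        = (b_l.map (fun row => (row.filter (fun x => x ∈ allowedCells)).length)).sum := by
      have step : ∀ (acc : ℕ) (c : String),
          b_l.foldl (fun a row => a + row.count c) acc = acc + (b_l.map (fun row => row.count c)).sum :=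
        fun acc c => foldl_add_map (fun row => row.count c) b_l acc
      have hfun : (fun acc c => b_l.foldl (fun a row => a + row.count c) acc)
          = (fun (acc : ℕ) (c : String) => acc + (b_l.map (fun row => row.count c)).sum) := by
        funext acc c; exact step acc c
      rw [hfun, foldl_add_map (fun c => (b_l.map (fun row => row.count c)).sum) allowedCells 0]
      simp only [Nat.zero_add]
      -- swap the two sums
      have hswap : ∀ (rows : List (List String)),
          (allowedCells.map (fun c => (rows.map (fun row => row.count c)).sum)).sum
            = (rows.map (fun row => (allowedCells.map (fun c => row.count c)).sum)).sum := by
        intro rows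
        induction rows with
        | nil => simp
        | cons row rest ihr =>
            simp only [List.map_cons, List.sum_cons, ← ihr]
            rw [← List.sum_map_add]
      rw [hswap]
      congr 1
      apply List.map_congr_left
      intro row _
      exact sum_count_eq_filter allowedCells (by decide) row
    rw [htot]
    have hbound : ∀ n ∈ b_l.map (fun row => (row.filter (fun x => x ∈ allowedCells)).length), n ≤ b_l.length := by
      intro n hn
      obtain ⟨row, hrow, rfl⟩ := List.mem_map.mp hn
      calc (row.filter (fun x => x ∈ allowedCells)).length ≤ row.length := List.length_filter_le _ _
        _ = b_l.length := hany row hrow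
    have hlenmap : (b_l.map (fun row => (row.filter (fun x => x ∈ allowedCells)).length)).length = b_l.length := by
      simp
    constructor
    · intro h
      refine ⟨hany, ?_⟩
      rw [beq_iff_eq] at h
      have := (sum_eq_mul_iff _ b_l.length hbound).mp (by rw [h, hlenmap])
      intro row hrow x hx
      have hfl := this _ (List.mem_map.mpr ⟨row, hrow, rfl⟩)
      have hall : ∀ x ∈ row, x ∈ allowedCells := by
        have := List.length_filter_eq_length_iff.mp (by rw [hfl, hany row hrow])
        intro y hy; simpa using this y hy
      exact hall x hx
    · intro ⟨_, hcells⟩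
      rw [beq_iff_eq]
      have hall : ∀ n ∈ b_l.map (fun row => (row.filter (fun x => x ∈ allowedCells)).length), n = b_l.length := by
        intro n hn
        obtain ⟨row, hrow, rfl⟩ := List.mem_map.mp hn
        have : (row.filter (fun x => x ∈ allowedCells)).length = row.length := by
          apply List.length_filter_eq_length_iff.mpr
          intro y hy
          simpa [allowedCells] using hcells row hrow y hy
        rw [this, hany row hrow]
      have := (sum_eq_mul_iff _ b_l.length hbound).mpr hall
      rwa [hlenmap] at this

theorem b_valid_eq_alt (b_l : List (List String)) : b_valid b_l = b_valid_alt b_l := by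
  rcases eq_or_ne b_l [] with rfl | hne
  · rfl
  · rw [Bool.eq_iff_iff, A_true_iff b_l hne, alt_true_iff b_l hne]

-- ===== VERDICT (by name: the statement is the Claim_ definition above) =====
theorem b_valid_spec : Claim_equal_b_valid := by
  intro b_l _
  unfold Spec_b_valid
  exact b_valid_eq_alt b_l
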